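-- pv_equiv track=rewrite | github.com/germainhirwa/kattis | src/Exponial/exponial.py | expomod
-- ===== SOURCE A (Python) =====
-- def f(n):
--     if n == 1:
--         return 1
--     return n ** f(n - 1)
--
-- def totient(n):
--     ans = n
--     temp = n
--     p = 2
--     while p * p <= n:
--         if temp % p == 0:
--             ans *= (p - 1)
--             ans //= p
--             while temp % p == 0:
--                 temp //= p
--         p += 1
--     return ans if temp == 1 else ans // temp * (temp - 1)
--
-- def expmod(a, b, m):
--     if b == 0:
--         return 1
--     elif b % 2:
--         return a * expmod(a, b - 1, m) % m
--     return expmod(a * a % m, b // 2, m)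
--
-- def expomod(n, m):
--     if m == 1:
--         return 0
--     if n <= 4:
--         return f(n) % m
--     else:
--         p = totient(m)
--         return expmod(n, p + expomod(n - 1, p), m)
-- ===== SOURCE B (Python) =====
-- def totient(n):
--     # multiplicative form: factor n and multiply phi(p^e) = p^e - p^(e-1)
--     res = 1
--     rem = n
--     p = 2
--     while p * p <= n:
--         if rem % p == 0:
--             pe = 1
--             while rem % p == 0:
--                 rem //= p
--                 pe *= p
--             res *= pe - pe // p
--         p += 1
--     return res * (rem - 1) if rem > 1 else res
--
-- def _powmod(a, e, m):
--     # iterative binary exponentiation: a**e mod m (returns 1 when e <= 0)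
--     r = 1
--     b = a % m
--     while e > 0:
--         if e % 2:
--             r = r * b % m
--         b = b * b % m
--         e //= 2
--     return r
--
-- def _tower(n):
--     # f(n) = n ** (n-1) ** ... ** 1, computed bottom-up
--     result = 1
--     for k in range(2, n + 1):
--         result = k ** result
--     return result
--
-- def expomod(n, m):
--     # descend: record (level, modulus, totient) until a base case stops the chain
--     stack = []
--     while True:
--         if m == 1:
--             val = 0
--             break
--         if n <= 4:
--             val = _tower(n) % m
--             break
--         t = totient(m)
--         stack.append((n, m, t))
--         n, m = n - 1, t
--     # ascend over the recorded levels
--     for (a, mod, t) in reversed(stack):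
--         val = _powmod(a, t + val, mod)
--     return val
-- ===== Notes on version B (the rewrite author's own statement) =====
-- stated objective: alternative
-- what changed: Replaces A's recursion (expomod calling itself through the totient chain, recursive expmod, recursive f) by an explicit descend loop pushing (level, modulus, totient) on a stack plus an ascending fold with an iterative binary-exponentiation loop; the n<=4 tower is computed bottom-up; and totient is restructured multiplicatively: factor out each prime power p^e and multiply phi(p^e)=p^e-p^(e-1) into an accumulator starting at 1, instead of A's repeated ans*(p-1)//p corrections of ans=n.
import Mathlib
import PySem

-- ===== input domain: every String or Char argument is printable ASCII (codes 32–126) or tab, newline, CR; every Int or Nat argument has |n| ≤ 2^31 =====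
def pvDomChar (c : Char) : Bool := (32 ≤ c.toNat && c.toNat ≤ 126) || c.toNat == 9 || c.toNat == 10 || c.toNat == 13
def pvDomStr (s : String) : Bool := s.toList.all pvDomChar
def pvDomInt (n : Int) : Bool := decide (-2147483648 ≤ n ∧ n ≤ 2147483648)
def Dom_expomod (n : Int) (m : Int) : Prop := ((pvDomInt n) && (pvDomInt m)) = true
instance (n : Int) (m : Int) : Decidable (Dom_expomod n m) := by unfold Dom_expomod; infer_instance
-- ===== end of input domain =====

-- B replaces A's recursion (expomod through the totient chain, recursive expmod, recursive f) by an
-- explicit descend loop with a stack, an ascending fold with an iterative binary-exponentiation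
-- loop, a bottom-up tower, and a multiplicative totient (product of φ(p^e)) instead of A's
-- divide-out-of-ans totient (objective: alternative).  Loops are ported with a Nat fuel equal to
-- the Python loop's own measure; the fuel-exhausted arms are reached only where Python diverges.

-- ===== PORT A =====

-- f(n): Python diverges (RecursionError) for n ≤ 0; fuel n.toNat reproduces every returning run
-- (the countdown hits n == 1 exactly).  f(n-1) ≥ 1 always, so '.toNat' on the exponent is exact.
def fAGo : Nat → Int → Int
  | 0, _ => 1
  | fuel + 1, n => if n ≤ 1 then 1 else n ^ (fAGo fuel (n - 1)).toNat

def fA (n : Int) : Int := fAGo n.toNat n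

-- inner 'while temp % p == 0: temp //= p' (fuel: temp.toNat strictly decreases on every run Python finishes)
def totInnerGoA : Nat → Int → Int → Int
  | 0, temp, _ => temp
  | fuel + 1, temp, p =>
    if PySem.Int.mod temp p = 0 then totInnerGoA fuel (PySem.Int.floordiv temp p) p else temp

-- outer 'while p * p <= n' loop of totient (p climbs from 2; fuel (n+1-p).toNat covers every iteration)
def totLoopGoA : Nat → Int → Int → Int → Int → Int × Int
  | 0, _, _, temp, ans => (temp, ans)
  | fuel + 1, n, p, temp, ans =>
    if p * p ≤ n then
      if PySem.Int.mod temp p = 0 then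
        totLoopGoA fuel n (p + 1) (totInnerGoA temp.toNat temp p)
          (PySem.Int.floordiv (ans * (p - 1)) p)
      else totLoopGoA fuel n (p + 1) temp ans
    else (temp, ans)

def totientA (k : Int) : Int :=
  let r := totLoopGoA (k - 1).toNat k 2 k k
  if r.1 = 1 then r.2 else PySem.Int.floordiv r.2 r.1 * (r.1 - 1)

-- expmod: Python returns 1 at b == 0 and diverges for b < 0; fuel b.toNat reproduces every returning run
def expmodGo : Nat → Int → Int → Int → Int
  | 0, _, _, _ => 1
  | fuel + 1, a, b, m =>
    if b ≤ 0 then 1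
    else if ¬ (PySem.Int.mod b 2 = 0) then PySem.Int.mod (a * expmodGo fuel a (b - 1) m) m
    else expmodGo fuel (PySem.Int.mod (a * a) m) (PySem.Int.floordiv b 2) m

def expmodA (a b m : Int) : Int := expmodGo b.toNat a b m

-- the level index n drops by 1 per recursive call, so fuel n.toNat covers every returning run
-- (the fuel-0 arm is the n ≤ 4 base: n ≤ 0 there)
def expomodGo : Nat → Int → Int → Int
  | 0, n, m => if m = 1 then 0 else PySem.Int.mod (fA n) m
  | fuel + 1, n, m =>
    if m = 1 then 0
    else if n ≤ 4 then PySem.Int.mod (fA n) m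
    else
      let p := totientA m
      expmodA n (p + expomodGo fuel (n - 1) p) m

def expomod (n : Int) (m : Int) : Int := expomodGo n.toNat n m

-- ===== PORT B =====

-- Source B's totient factors n multiplicatively: inner 'while rem % p == 0: rem //= p; pe *= p'
-- collects the prime power pe = p^e while stripping rem (fuel rem.toNat, as for A's inner loop)
def stripGoB : Nat → Int → Int → Int → Int × Int
  | 0, rem, _, pe => (rem, pe)
  | fuel + 1, rem, p, pe =>
    if PySem.Int.mod rem p = 0 then stripGoB fuel (PySem.Int.floordiv rem p) p (pe * p)
    else (rem, pe)

-- outer 'while p * p <= n' of Source B's totient: res accumulates φ(p^e) = pe - pe // p per prime found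
def phiLoopB : Nat → Int → Int → Int → Int → Int × Int
  | 0, _, _, rem, res => (rem, res)
  | fuel + 1, n, p, rem, res =>
    if p * p ≤ n then
      if PySem.Int.mod rem p = 0 then
        let s := stripGoB rem.toNat rem p 1
        phiLoopB fuel n (p + 1) s.1 (res * (s.2 - PySem.Int.floordiv s.2 p))
      else phiLoopB fuel n (p + 1) rem res
    else (rem, res)

def totientB (k : Int) : Int :=
  let r := phiLoopB (k - 1).toNat k 2 k 1
  if 1 < r.1 then r.2 * (r.1 - 1) else r.2

-- iterative binary exponentiation: 'while e > 0: if e % 2: r = r*b%m; b = b*b%m; e //= 2'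
-- (fuel e.toNat: e at least halves each pass)
def powGoB : Nat → Int → Int → Int → Int → Int
  | 0, r, _, _, _ => r
  | fuel + 1, r, b, e, m =>
    if 0 < e then
      powGoB fuel (if ¬ (PySem.Int.mod e 2 = 0) then PySem.Int.mod (r * b) m else r)
        (PySem.Int.mod (b * b) m) (PySem.Int.floordiv e 2) m
    else r

def powmodB (a e m : Int) : Int := powGoB e.toNat 1 (PySem.Int.mod a m) e m

-- _tower: 'result = 1; for k in range(2, n+1): result = k ** result' (result ≥ 1, so '.toNat' is exact)
def towerB (n : Int) : Int :=
  (PySem.List.pyRange 2 (n + 1) 1).foldl (fun acc k => k ^ acc.toNat) 1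

-- descend loop of Source B: it pushes each level to the FRONT of the stack, so the ascending
-- 'for ... in reversed(stack)' of Source B is a plain forward fold here; fuel n.toNat as for A.
def descendGoB : Nat → Int → Int → List (Int × Int × Int) → List (Int × Int × Int) × Int
  | 0, n, m, stack => if m = 1 then (stack, 0) else (stack, PySem.Int.mod (towerB n) m)
  | fuel + 1, n, m, stack =>
    if m = 1 then (stack, 0)
    else if n ≤ 4 then (stack, PySem.Int.mod (towerB n) m)
    else
      let t := totientB m
      descendGoB fuel (n - 1) t ((n, m, t) :: stack)

-- one step of the ascending loop: val = _powmod(a, t + val, mod)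
def stepB (val : Int) (x : Int × Int × Int) : Int := powmodB x.1 (x.2.2 + val) x.2.1

def expomod_alt (n : Int) (m : Int) : Int :=
  let r := descendGoB n.toNat n m []
  r.1.foldl stepB r.2

-- ===== PRECONDITION & SPEC =====
-- Exactly the inputs on which Python A returns: A raises ZeroDivisionError when m = 0 (n ≥ 1),
-- RecursionError when n ≤ 0 with m ≠ 1 (f recurses forever) and when n ≥ 5 with m ≤ 0
-- (expmod is reached with a negative exponent).
def Pre_expomod (n : Int) (m : Int) : Prop :=
  m = 1 ∨ (1 ≤ n ∧ n ≤ 4 ∧ m ≠ 0) ∨ (5 ≤ n ∧ 2 ≤ m)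
instance (n : Int) (m : Int) : Decidable (Pre_expomod n m) := by unfold Pre_expomod; infer_instance

def pvWitness_expomod : Int × Int := (7, 10)

def Spec_expomod (n : Int) (m : Int) (out : Int) : Prop := out = expomod_alt n m
instance (n : Int) (m : Int) (out : Int) : Decidable (Spec_expomod n m out) := by unfold Spec_expomod; infer_instance

-- ===== CLAIM (what is proved, stated in full; the proofs are below) =====
def Claim_equal_expomod : Prop := ∀ (n : Int) (m : Int), Dom_expomod n m → Pre_expomod n m → Spec_expomod n m (expomod n m)

-- ===== LEMMAS AND PROOFS =====

-- (x mod m)^k ≡ x^k  (PySem.Int.mod is Int.fmod; holds for every m, including m = 0)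
theorem pv_pow_fmod (x m : Int) (k : Nat) : ((x.fmod m) ^ k).fmod m = (x ^ k).fmod m := by
  induction k with
  | zero => simp
  | succ j ih =>
    rw [pow_succ, pow_succ, Int.mul_fmod ((x.fmod m) ^ j), Int.mul_fmod (x ^ j), ih, Int.fmod_fmod]

theorem pv_mul_fmod_right (x y m : Int) : (x * (y.fmod m)).fmod m = (x * y).fmod m := by
  rw [Int.mul_fmod x (y.fmod m), Int.fmod_fmod, ← Int.mul_fmod]

-- A's expmod returns 1 whenever b ≤ 0 (Python: b == 0)
theorem expmodGo_nonpos (fuel : Nat) (a b m : Int) (hb : b ≤ 0) : expmodGo fuel a b m = 1 := by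
  cases fuel with
  | zero => rfl
  | succ f => simp [expmodGo, hb]

-- A's recursive expmod computes a^b mod m (as Int.fmod) for every b ≥ 1
theorem expmodGo_eq : ∀ (fuel : Nat) (a b m : Int), b.toNat ≤ fuel → 1 ≤ b →
    expmodGo fuel a b m = (a ^ b.toNat).fmod m := by
  intro fuel
  induction fuel with
  | zero => intro a b m hk hb; omega
  | succ f ih =>
    intro a b m hk hb
    rw [expmodGo, if_neg (by omega)]
    have hmod2 : PySem.Int.mod b 2 = b % 2 := PySem.Int.mod_eq_emod_of_pos (by omega)
    by_cases hodd : PySem.Int.mod b 2 = 0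
    · -- even branch: b ≥ 2
      have he0 : b % 2 = 0 := by rw [← hmod2]; exact hodd
      rw [if_neg (not_not_intro hodd), PySem.Int.floordiv_eq_ediv_of_pos (by omega)]
      rw [ih _ _ _ (by omega) (by omega)]
      show ((PySem.Int.mod (a * a) m) ^ (b / 2).toNat).fmod m = _
      have hbb : PySem.Int.mod (a * a) m = (a * a).fmod m := rfl
      rw [hbb, pv_pow_fmod]
      have hsq : (a * a) ^ (b / 2).toNat = a ^ b.toNat := by
        rw [← pow_two, ← pow_mul]
        congr 1
        omega
      rw [hsq]
    · -- odd branch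
      rw [if_pos hodd]
      show ((a * expmodGo f a (b - 1) m).fmod m) = _
      by_cases hb1 : b = 1
      · subst hb1
        rw [show (1 : Int) - 1 = 0 from rfl, expmodGo_nonpos f a 0 m (by omega)]
        norm_num
      · rw [ih a (b - 1) m (by omega) (by omega), pv_mul_fmod_right]
        congr 1
        have hsucc : b.toNat = (b - 1).toNat + 1 := by omega
        rw [hsucc, pow_succ]
        ring

-- B's loop returns its accumulator untouched for e ≤ 0
theorem powGoB_nonpos (fuel : Nat) (r b e m : Int) (he : e ≤ 0) : powGoB fuel r b e m = r := by
  cases fuel with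
  | zero => rfl
  | succ f =>
    have h : ¬ (0 < e) := by omega
    simp [powGoB, h]

-- B's binary-exponentiation loop computes r * b^e mod m for every e ≥ 1
theorem powGoB_eq : ∀ (fuel : Nat) (r b e m : Int), e.toNat ≤ fuel → 1 ≤ e →
    powGoB fuel r b e m = (r * b ^ e.toNat).fmod m := by
  intro fuel
  induction fuel with
  | zero => intro r b e m hk he; omega
  | succ f ih =>
    intro r b e m hk he
    rw [powGoB, if_pos (by omega), PySem.Int.floordiv_eq_ediv_of_pos (by omega)]
    have hmod2 : PySem.Int.mod e 2 = e % 2 := PySem.Int.mod_eq_emod_of_pos (by omega)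
    by_cases he1 : e = 1
    · subst he1
      rw [if_pos (by rw [hmod2]; decide)]
      rw [powGoB_nonpos f _ _ _ _ (by decide)]
      show (r * b).fmod m = (r * b ^ (1 : Int).toNat).fmod m
      norm_num
    · have he2 : 1 ≤ e / 2 := by omega
      by_cases hodd : PySem.Int.mod e 2 = 0
      · -- even pass
        have he0 : e % 2 = 0 := by rw [← hmod2]; exact hodd
        rw [if_neg (not_not_intro hodd), ih _ _ _ _ (by omega) he2]
        show (r * (PySem.Int.mod (b * b) m) ^ (e / 2).toNat).fmod m = _
        have hbb : PySem.Int.mod (b * b) m = (b * b).fmod m := rfl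
        rw [hbb, ← pv_mul_fmod_right r, pv_pow_fmod, pv_mul_fmod_right]
        have hx : (b * b) ^ (e / 2).toNat = b ^ e.toNat := by
          rw [← pow_two, ← pow_mul]
          congr 1
          omega
        rw [hx]
      · -- odd pass, e ≥ 3
        have he1' : e % 2 = 1 := by omega
        rw [if_pos hodd, ih _ _ _ _ (by omega) he2]
        show ((PySem.Int.mod (r * b) m) * (PySem.Int.mod (b * b) m) ^ (e / 2).toNat).fmod m = _
        have hrb : PySem.Int.mod (r * b) m = (r * b).fmod m := rfl
        have hbb : PySem.Int.mod (b * b) m = (b * b).fmod m := rfl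
        rw [hrb, hbb, ← pv_mul_fmod_right ((r * b).fmod m), pv_pow_fmod,
            pv_mul_fmod_right, Int.mul_fmod, Int.fmod_fmod, ← Int.mul_fmod]
        congr 1
        have hx : (b * b) ^ (e / 2).toNat = b ^ (2 * (e / 2).toNat) := by
          rw [← pow_two, ← pow_mul]
        rw [hx]
        have he' : e.toNat = 2 * (e / 2).toNat + 1 := by omega
        rw [he', pow_succ]
        ring

-- A's expmod and B's _powmod agree on every input (for b ≤ 0 both return 1)
theorem expmod_eq_powmod (a b m : Int) : expmodA a b m = powmodB a b m := by
  unfold expmodA powmodB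
  by_cases hb : 1 ≤ b
  · rw [expmodGo_eq b.toNat a b m le_rfl hb, powGoB_eq b.toNat 1 (PySem.Int.mod a m) b m le_rfl hb,
        one_mul]
    show (a ^ b.toNat).fmod m = ((a.fmod m) ^ b.toNat).fmod m
    rw [pv_pow_fmod]
  · rw [expmodGo_nonpos _ _ _ _ (by omega), powGoB_nonpos _ _ _ _ _ (by omega)]

-- mod rem p = 0 means p divides rem (p > 0; PySem.Int.mod is fmod)
theorem pv_mod_zero_dvd (rem p : Int) (hp : 0 < p) (h : PySem.Int.mod rem p = 0) : p ∣ rem := by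
  rw [PySem.Int.mod_eq_emod_of_pos hp] at h
  exact Int.dvd_of_emod_eq_zero h

-- joint invariant of the two (structurally identical) stripping loops: B's carries pe as well;
-- pe' * rem' = pe * rem, everything stays ≥ 1, pe divides pe', and p divides pe' once a strip ran
theorem strip_spec : ∀ (fuel : Nat) (rem p pe : Int), 2 ≤ p → 1 ≤ rem → 1 ≤ pe →
    (stripGoB fuel rem p pe).1 = totInnerGoA fuel rem p
  ∧ (stripGoB fuel rem p pe).2 * (stripGoB fuel rem p pe).1 = pe * rem
  ∧ 1 ≤ (stripGoB fuel rem p pe).1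
  ∧ 1 ≤ (stripGoB fuel rem p pe).2
  ∧ pe ∣ (stripGoB fuel rem p pe).2
  ∧ (PySem.Int.mod rem p = 0 → 0 < fuel → p ∣ (stripGoB fuel rem p pe).2) := by
  intro fuel
  induction fuel with
  | zero =>
    intro rem p pe hp hr hpe
    exact ⟨rfl, mul_comm pe rem ▸ rfl, hr, hpe, dvd_refl pe, fun _ h => absurd h (by omega)⟩
  | succ f ih =>
    intro rem p pe hp hr hpe
    by_cases hmod : PySem.Int.mod rem p = 0
    · obtain ⟨t, ht⟩ := pv_mod_zero_dvd rem p (by omega) hmod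
      have ht1 : 1 ≤ t := by nlinarith
      have hdiv : PySem.Int.floordiv rem p = t := by
        rw [PySem.Int.floordiv_eq_ediv_of_pos (by omega), ht, Int.mul_ediv_cancel_left t (by omega)]
      have hstep : stripGoB (f + 1) rem p pe = stripGoB f t p (pe * p) := by
        rw [stripGoB, if_pos hmod, hdiv]
      have hstepA : totInnerGoA (f + 1) rem p = totInnerGoA f t p := by
        rw [totInnerGoA, if_pos hmod, hdiv]
      obtain ⟨h1, h2, h3, h4, h5, _⟩ := ih t p (pe * p) hp ht1 (by nlinarith)
      refine ⟨by rw [hstep, hstepA, h1], ?_, by rw [hstep]; exact h3, by rw [hstep]; exact h4,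
        ?_, fun _ _ => ?_⟩
      · rw [hstep, h2, ht]; ring
      · rw [hstep]; exact dvd_trans (Dvd.intro p rfl) h5
      · rw [hstep]; exact dvd_trans (Dvd.intro_left pe rfl) h5
    · have hstep : stripGoB (f + 1) rem p pe = (rem, pe) := by rw [stripGoB, if_neg hmod]
      have hstepA : totInnerGoA (f + 1) rem p = rem := by rw [totInnerGoA, if_neg hmod]
      rw [hstep, hstepA]
      exact ⟨rfl, mul_comm pe rem ▸ rfl, hr, hpe, dvd_refl pe, fun h _ => absurd h hmod⟩

-- joint invariant of A's totient loop (dividing ans) and B's (multiplying res): ans = res * rem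
theorem phiLoop_spec : ∀ (fuel : Nat) (n p rem ans res : Int), 2 ≤ p → 1 ≤ rem → 1 ≤ res →
    ans = res * rem →
    (totLoopGoA fuel n p rem ans).1 = (phiLoopB fuel n p rem res).1
  ∧ 1 ≤ (totLoopGoA fuel n p rem ans).1
  ∧ 1 ≤ (phiLoopB fuel n p rem res).2
  ∧ (totLoopGoA fuel n p rem ans).2 = (phiLoopB fuel n p rem res).2 * (totLoopGoA fuel n p rem ans).1 := by
  intro fuel
  induction fuel with
  | zero =>
    intro n p rem ans res hp hr hres hans
    exact ⟨rfl, hr, hres, hans⟩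
  | succ f ih =>
    intro n p rem ans res hp hr hres hans
    by_cases hcond : p * p ≤ n
    · by_cases hmod : PySem.Int.mod rem p = 0
      · -- a prime factor p is stripped on both sides
        obtain ⟨hs1, hs2, hs3, hs4, _, hs6⟩ := strip_spec rem.toNat rem p 1 hp hr le_rfl
        obtain ⟨q, hq⟩ := hs6 hmod (by omega)
        have hq1 : 1 ≤ q := by nlinarith
        have hpe : PySem.Int.floordiv (stripGoB rem.toNat rem p 1).2 p = q := by
          rw [PySem.Int.floordiv_eq_ediv_of_pos (by omega), hq,
            Int.mul_ediv_cancel_left q (by omega)]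
        have hansdiv : PySem.Int.floordiv (ans * (p - 1)) p
            = res * (q * (p - 1)) * (stripGoB rem.toNat rem p 1).1 := by
          have hkey : ans * (p - 1) = p * (res * (q * (p - 1)) * (stripGoB rem.toNat rem p 1).1) := by
            rw [hans]
            linear_combination (-(res * (p - 1))) * hs2
              + (res * (p - 1) * (stripGoB rem.toNat rem p 1).1) * hq
          rw [hkey, PySem.Int.floordiv_eq_ediv_of_pos (by omega),
            Int.mul_ediv_cancel_left _ (by omega : (p : Int) ≠ 0)]
        have hstepA : totLoopGoA (f + 1) n p rem ans
            = totLoopGoA f n (p + 1) (stripGoB rem.toNat rem p 1).1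
                (PySem.Int.floordiv (ans * (p - 1)) p) := by
          rw [totLoopGoA, if_pos hcond, if_pos hmod, hs1]
        have hstepB : phiLoopB (f + 1) n p rem res
            = phiLoopB f n (p + 1) (stripGoB rem.toNat rem p 1).1
                (res * ((stripGoB rem.toNat rem p 1).2 - q)) := by
          simp only [phiLoopB, if_pos hcond, if_pos hmod, hpe]
        have hres' : res * ((stripGoB rem.toNat rem p 1).2 - q) = res * (q * (p - 1)) := by
          rw [hq]; ring
        rw [hstepA, hstepB, hres', hansdiv]
        exact ih n (p + 1) (stripGoB rem.toNat rem p 1).1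
          (res * (q * (p - 1)) * (stripGoB rem.toNat rem p 1).1) (res * (q * (p - 1)))
          (by omega) hs3
          (by
            have h1 : 1 ≤ q * (p - 1) := by nlinarith
            nlinarith) rfl
      · have hstepA : totLoopGoA (f + 1) n p rem ans = totLoopGoA f n (p + 1) rem ans := by
          rw [totLoopGoA, if_pos hcond, if_neg hmod]
        have hstepB : phiLoopB (f + 1) n p rem res = phiLoopB f n (p + 1) rem res := by
          rw [phiLoopB, if_pos hcond, if_neg hmod]
        rw [hstepA, hstepB]
        exact ih n (p + 1) rem ans res (by omega) hr hres hans
    · have hstepA : totLoopGoA (f + 1) n p rem ans = (rem, ans) := by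
        rw [totLoopGoA, if_neg hcond]
      have hstepB : phiLoopB (f + 1) n p rem res = (rem, res) := by
        rw [phiLoopB, if_neg hcond]
      rw [hstepA, hstepB]
      exact ⟨rfl, hr, hres, hans⟩

-- B's multiplicative totient equals A's divide-out totient, and it is positive, for every k ≥ 1
theorem totient_eqpos (k : Int) (hk : 1 ≤ k) : totientB k = totientA k ∧ 1 ≤ totientB k := by
  obtain ⟨h1, h2, h3, h4⟩ :=
    phiLoop_spec (k - 1).toNat k 2 k k 1 le_rfl hk le_rfl (by ring)
  unfold totientA totientB
  by_cases hone : (totLoopGoA (k - 1).toNat k 2 k k).1 = 1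
  · rw [if_pos hone, if_neg (by rw [← h1, hone]; omega), h4, hone, mul_one]
    exact ⟨rfl, h3⟩
  · have h2' : 2 ≤ (totLoopGoA (k - 1).toNat k 2 k k).1 := by omega
    have hdiv : PySem.Int.floordiv (totLoopGoA (k - 1).toNat k 2 k k).2
        (totLoopGoA (k - 1).toNat k 2 k k).1 = (phiLoopB (k - 1).toNat k 2 k 1).2 := by
      rw [PySem.Int.floordiv_eq_ediv_of_pos (by omega), h4, mul_comm,
        Int.mul_ediv_cancel_left _ (by omega)]
    rw [if_neg hone, if_pos (by rw [← h1]; omega), hdiv, ← h1]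
    exact ⟨rfl, by nlinarith⟩

theorem totient_eq (k : Int) (hk : 1 ≤ k) : totientB k = totientA k := (totient_eqpos k hk).1

theorem totientA_pos (k : Int) (hk : 1 ≤ k) : 1 ≤ totientA k := by
  rw [← totient_eq k hk]; exact (totient_eqpos k hk).2

-- B's bottom-up tower equals A's recursive f (both ports return 1 for n ≤ 1)
theorem tower_eq : ∀ (k : Nat) (n : Int), n.toNat = k → towerB n = fAGo k n := by
  intro k
  induction k with
  | zero =>
    intro n hk
    unfold towerB
    rw [PySem.List.pyRange_one_eq_nil (by omega)]
    rfl
  | succ f ih =>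
    intro n hk
    rw [fAGo]
    by_cases hn : n ≤ 1
    · rw [if_pos hn]
      unfold towerB
      rw [PySem.List.pyRange_one_eq_nil (by omega)]
      rfl
    · rw [if_neg hn]
      unfold towerB
      rw [PySem.List.pyRange_one_succ_right (by omega), List.foldl_append]
      simp only [List.foldl]
      have h2 : PySem.List.pyRange 2 n 1 = PySem.List.pyRange 2 (n - 1 + 1) 1 := by
        congr 1
        omega
      have h1 : (PySem.List.pyRange 2 (n - 1 + 1) 1).foldl (fun acc k => k ^ acc.toNat) 1
          = towerB (n - 1) := rfl
      rw [h2, h1, ih (n - 1) (by omega)]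

theorem tower_eq_fA (n : Int) : towerB n = fA n := tower_eq n.toNat n rfl

-- unfolding A's expomod at its two base cases, whatever n.toNat is
theorem expomod_m1 (n : Int) : expomod n 1 = 0 := by
  unfold expomod
  cases n.toNat <;> simp [expomodGo]

theorem expomod_base (n m : Int) (hm : m ≠ 1) (hn : n ≤ 4) :
    expomod n m = PySem.Int.mod (fA n) m := by
  unfold expomod
  cases n.toNat <;> simp [expomodGo, hm, hn]

-- main invariant: folding the stack produced by B's descend loop over B's ascend step
-- yields A's recursive expomod applied underneath the pending stack (the disjunctive
-- hypothesis is what Pre_ guarantees at the top and totientA_pos re-establishes per level)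
theorem descend_eq : ∀ (fuel : Nat) (n m : Int), n.toNat ≤ fuel → (m = 1 ∨ n ≤ 4 ∨ 1 ≤ m) →
    ∀ (stack : List (Int × Int × Int)),
    (descendGoB fuel n m stack).1.foldl stepB (descendGoB fuel n m stack).2
      = stack.foldl stepB (expomod n m) := by
  intro fuel
  induction fuel with
  | zero =>
    intro n m hk hcase stack
    rw [descendGoB]
    by_cases hm : m = 1
    · subst hm
      rw [if_pos rfl, expomod_m1]
    · rw [if_neg hm, expomod_base n m hm (by omega), tower_eq_fA]
  | succ f ih =>
    intro n m hk hcase stack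
    rw [descendGoB]
    by_cases hm : m = 1
    · subst hm
      rw [if_pos rfl, expomod_m1]
    · rw [if_neg hm]
      by_cases hn : n ≤ 4
      · rw [if_pos hn, expomod_base n m hm hn, tower_eq_fA]
      · rw [if_neg hn]
        have hm2 : 2 ≤ m := by rcases hcase with h | h | h <;> omega
        simp only
        rw [totient_eq m (by omega)]
        rw [ih (n - 1) (totientA m) (by omega)
          (Or.inr (Or.inr (totientA_pos m (by omega)))) ((n, m, totientA m) :: stack)]
        simp only [List.foldl]
        have hunf : expomod n m
            = expmodA n (totientA m + expomodGo (n - 1).toNat (n - 1) (totientA m)) m := by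
          unfold expomod
          have hsucc : n.toNat = (n - 1).toNat + 1 := by omega
          rw [hsucc, expomodGo, if_neg hm, if_neg hn]
        rw [hunf,
            show stepB (expomod (n - 1) (totientA m)) (n, m, totientA m)
              = powmodB n (totientA m + expomod (n - 1) (totientA m)) m from rfl,
            ← expmod_eq_powmod]
        rfl

-- ===== VERDICT (by name: the statement is the Claim_ definition above) =====
theorem expomod_spec : Claim_equal_expomod := by
  intro n m _hdom hpre
  unfold Spec_expomod expomod_alt
  have hcase : m = 1 ∨ n ≤ 4 ∨ 1 ≤ m := by
    rcases hpre with h | h | h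
    · exact Or.inl h
    · exact Or.inr (Or.inl h.2.1)
    · exact Or.inr (Or.inr (by omega))
  have h := descend_eq n.toNat n m le_rfl hcase []
  simp only [List.foldl] at h
  exact h.symm
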